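-- pv_equiv track=rewrite | github.com/mblsha/retrobus-explorer | gateware/reference/spade-projects/sharp-pc-e500-card-spade/experiments/experiment_catalog.py | build_asm_pushu_a_popu_imr_81_chain
-- ===== SOURCE A (Python) =====
-- def build_asm_pushu_a_popu_imr_81_chain(count: int) -> str:
--     lines = [
--         ".ORG 0x10100",
--         "",
--         "start:",
--         "    MV A, 0x81",
--     ]
--     for _ in range(count):
--         lines.append("    PUSHU A")
--         lines.append("    POPU IMR")
--     lines.append("    RETF")
--     lines.append("")
--     return "\n".join(lines)
-- ===== SOURCE B (Python) =====
-- def build_asm_pushu_a_popu_imr_81_chain(count: int) -> str: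
--     header = ".ORG 0x10100\n\nstart:\n    MV A, 0x81\n"
--     block = "    PUSHU A\n    POPU IMR\n"
--     footer = "    RETF\n"
--     return header + block * count + footer
-- ===== Notes on version B (the rewrite author's own statement) =====
-- stated objective: simpler
-- what changed: Replaces the list-building loop plus '\n'.join with direct string concatenation of a header literal, the repeated block via string multiplication, and a footer literal.
import Mathlib
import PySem

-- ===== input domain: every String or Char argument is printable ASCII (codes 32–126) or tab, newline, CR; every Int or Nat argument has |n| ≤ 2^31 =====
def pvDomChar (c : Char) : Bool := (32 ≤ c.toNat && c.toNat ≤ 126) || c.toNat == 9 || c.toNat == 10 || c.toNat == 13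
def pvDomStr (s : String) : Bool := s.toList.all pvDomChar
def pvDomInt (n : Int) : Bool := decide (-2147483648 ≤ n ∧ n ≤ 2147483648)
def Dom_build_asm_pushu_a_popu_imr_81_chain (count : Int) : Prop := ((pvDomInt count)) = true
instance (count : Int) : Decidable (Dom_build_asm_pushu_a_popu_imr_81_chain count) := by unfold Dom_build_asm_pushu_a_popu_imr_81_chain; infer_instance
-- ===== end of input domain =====

-- B replaces the list-building loop + "\n".join by header ++ block * count ++ footer (simpler decomposition).


-- ===== PORT A =====
def build_asm_pushu_a_popu_imr_81_chain (count : Int) : String :=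
  let lines : List String := [".ORG 0x10100", "", "start:", "    MV A, 0x81"]
  let lines := (PySem.List.pyRange 0 count 1).foldl
    (fun acc _ => (acc ++ ["    PUSHU A"]) ++ ["    POPU IMR"]) lines
  let lines := (lines ++ ["    RETF"]) ++ [""]
  PySem.Str.join "\n" lines

-- ===== PORT B =====
def build_asm_pushu_a_popu_imr_81_chain_alt (count : Int) : String :=
  let header := ".ORG 0x10100\n\nstart:\n    MV A, 0x81\n"
  let block := "    PUSHU A\n    POPU IMR\n"
  let footer := "    RETF\n"
  header ++ String.ofList (PySem.List.pyRepeat block.toList count) ++ footer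

-- ===== PRECONDITION & SPEC =====
def Spec_build_asm_pushu_a_popu_imr_81_chain (count : Int) (out : String) : Prop := out = build_asm_pushu_a_popu_imr_81_chain_alt count
instance (count : Int) (out : String) : Decidable (Spec_build_asm_pushu_a_popu_imr_81_chain count out) := by unfold Spec_build_asm_pushu_a_popu_imr_81_chain; infer_instance

-- ===== CLAIM (what is proved, stated in full; the proofs are below) =====
def Claim_equal_build_asm_pushu_a_popu_imr_81_chain : Prop := ∀ (count : Int), Dom_build_asm_pushu_a_popu_imr_81_chain count → Spec_build_asm_pushu_a_popu_imr_81_chain count (build_asm_pushu_a_popu_imr_81_chain count)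

-- ===== LEMMAS AND PROOFS =====

-- join over a cons with a nonempty tail (unfolds one separator)
theorem pv_join_cons_ne (sep x : List Char) (ys : List (List Char)) (h : ys ≠ []) :
    PySem.Chars.join sep (x :: ys) = x ++ sep ++ PySem.Chars.join sep ys := by
  cases ys with
  | nil => exact absurd rfl h
  | cons q rest => exact PySem.Chars.join_cons_cons sep x q rest

-- constant flatMap is a flattened replicate
theorem pv_flatMap_const {α β : Type} (l : List α) (c : List β) :
    l.flatMap (fun _ => c) = (List.replicate l.length c).flatten := by
  induction l with
  | nil => rfl
  | cons a t ih => simp [List.flatMap_cons, List.replicate_succ, ih]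

-- the repeated PUSHU/POPU section joined with '\n', followed by the RETF tail
theorem pv_inner (n : Nat) :
    PySem.Chars.join "\n".toList
      ((List.replicate n ["    PUSHU A".toList, "    POPU IMR".toList]).flatten
        ++ ["    RETF".toList, "".toList]) =
    (List.replicate n "    PUSHU A\n    POPU IMR\n".toList).flatten ++ "    RETF\n".toList := by
  induction n with
  | zero => decide
  | succ m ih =>
    rw [List.replicate_succ, List.replicate_succ, List.flatten_cons, List.flatten_cons]
    simp only [List.cons_append, List.nil_append]
    rw [pv_join_cons_ne _ _ _ (by simp), pv_join_cons_ne _ _ _ (by simp)]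
    rw [ih]
    rw [show "    PUSHU A\n    POPU IMR\n".toList
        = "    PUSHU A".toList ++ "\n".toList ++ ("    POPU IMR".toList ++ "\n".toList) by decide]
    simp only [List.append_assoc]

theorem pv_core (n : Nat) :
    (PySem.Str.join "\n"
      (([".ORG 0x10100", "", "start:", "    MV A, 0x81"]
        ++ (List.replicate n ["    PUSHU A", "    POPU IMR"]).flatten)
        ++ ["    RETF"] ++ [""])).toList =
    ".ORG 0x10100\n\nstart:\n    MV A, 0x81\n".toList
      ++ (List.replicate n "    PUSHU A\n    POPU IMR\n".toList).flatten
      ++ "    RETF\n".toList := by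
  rw [PySem.Str.toList_join]
  simp only [List.map_append, List.map_cons, List.map_nil, List.map_flatten, List.map_replicate,
    List.cons_append, List.nil_append, List.append_assoc]
  rw [pv_join_cons_ne _ _ _ (by simp), pv_join_cons_ne _ _ _ (by simp),
      pv_join_cons_ne _ _ _ (by simp), pv_join_cons_ne _ _ _ (by simp)]
  rw [pv_inner n]
  rw [show ".ORG 0x10100\n\nstart:\n    MV A, 0x81\n".toList
      = ".ORG 0x10100".toList ++ "\n".toList ++ ("".toList ++ "\n".toList
        ++ ("start:".toList ++ "\n".toList ++ ("    MV A, 0x81".toList ++ "\n".toList))) by decide]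
  simp only [List.append_assoc]

-- ===== VERDICT (by name: the statement is the Claim_ definition above) =====
theorem build_asm_pushu_a_popu_imr_81_chain_spec : Claim_equal_build_asm_pushu_a_popu_imr_81_chain := by
  intro count _
  unfold Spec_build_asm_pushu_a_popu_imr_81_chain
  unfold build_asm_pushu_a_popu_imr_81_chain build_asm_pushu_a_popu_imr_81_chain_alt
  apply String.toList_inj.mp
  simp only []
  have hf : (fun (acc : List String) (_ : Int) => (acc ++ ["    PUSHU A"]) ++ ["    POPU IMR"])
      = (fun (acc : List String) (_ : Int) => acc ++ ["    PUSHU A", "    POPU IMR"]) := by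
    funext acc x; simp
  rw [hf, PySem.List.foldl_append_eq_flatMap (fun _ => ["    PUSHU A", "    POPU IMR"]),
      pv_flatMap_const, PySem.List.length_pyRange_one]
  rw [show (count - 0 : Int) = count by ring]
  rw [pv_core count.toNat]
  rw [String.toList_append, String.toList_append, String.toList_ofList]
  simp only [PySem.List.pyRepeat, List.append_assoc, String.toList_ofList]
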